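-- pv_equiv track=rewrite | github.com/fioriandrea/mbase | mbase.py | rows_to_remove
-- ===== SOURCE A (Python) =====
-- def rows_to_remove(matrix):
--     result = set()
--     for i, row in enumerate(matrix):
--         toremove = False
--         for j, other in enumerate(matrix):
--             if i == j:
--                 continue
--             if is_subset(other, row):
--                 toremove = True
--                 break
--         if toremove:
--             result.add(i)
--     return result
--
-- def is_subset(subset, superset):
--     result = True
--     for sub_element, super_element in zip(subset, superset):
--         if sub_element == 1 and super_element != 1:
--             result = False
--             break
--     return result
-- ===== SOURCE B (Python) =====
-- def rows_to_remove(matrix):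
--     # Column-wise inverted index: col[k] is a bitset (big int) of the rows having a 1
--     # in column k.  Row i is removable iff some other row avoids every column where
--     # row i lacks a 1; collect the violators of row i by OR-ing the column bitsets at
--     # its non-1 positions and compare against the all-rows bitset.  No row-vs-row scan.
--     n = len(matrix)
--     width = max((len(row) for row in matrix), default=0)
--     col = [0] * width
--     for j, row in enumerate(matrix):
--         for k, x in enumerate(row):
--             if x == 1:
--                 col[k] |= 1 << j
--     allrows = (1 << n) - 1
--     result = set()
--     for i, row in enumerate(matrix):
--         violators = 1 << i
--         for k, x in enumerate(row):
--             if x != 1: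
--                 violators |= col[k]
--         if violators != allrows:
--             result.add(i)
--     return result
-- ===== Notes on version B (the rewrite author's own statement) =====
-- stated objective: alternative
-- what changed: B drops A's row-vs-row scan entirely: it builds a column-wise inverted index (one bitset of row indices per column) in a single pass, then decides each row i by OR-ing the column bitsets at row i's non-1 positions and comparing the resulting violator set against the all-rows bitset.
import Mathlib
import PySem

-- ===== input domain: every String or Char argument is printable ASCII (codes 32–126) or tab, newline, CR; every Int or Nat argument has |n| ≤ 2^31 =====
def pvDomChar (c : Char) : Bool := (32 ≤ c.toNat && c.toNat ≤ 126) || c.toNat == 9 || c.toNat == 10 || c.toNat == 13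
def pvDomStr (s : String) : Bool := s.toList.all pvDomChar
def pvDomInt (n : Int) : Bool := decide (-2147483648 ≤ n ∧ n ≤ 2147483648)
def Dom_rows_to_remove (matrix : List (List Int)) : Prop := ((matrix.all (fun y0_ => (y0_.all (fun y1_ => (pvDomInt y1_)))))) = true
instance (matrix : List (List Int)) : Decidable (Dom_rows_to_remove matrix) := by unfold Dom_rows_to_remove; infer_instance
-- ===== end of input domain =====

-- B replaces A's row-vs-row scan by a column-wise inverted index (one bitset of row
-- indices per column), OR-ed per row to find its violators (alternative algorithm).


-- ===== PORT A =====
-- is_subset: loop over zip with early break on a violating pair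
def isSubsetLoop : List (Int × Int) → Bool
  | [] => true
  | (a, b) :: rest => if a = 1 ∧ b ≠ 1 then false else isSubsetLoop rest

def is_subset (subset superset : List Int) : Bool :=
  isSubsetLoop (subset.zip superset)

-- inner loop of A: scan enumerate(matrix), skip j = i, break on first subset found
def innerLoop (i : Int) (row : List Int) : List (Int × List Int) → Bool
  | [] => false
  | (j, other) :: rest =>
      if i = j then innerLoop i row rest
      else if is_subset other row then true
      else innerLoop i row rest

def rows_to_remove (matrix : List (List Int)) : List Int :=
  (PySem.List.enumerate matrix).foldl
    (fun (result : PySem.Set Int) p =>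
      if innerLoop p.1 p.2 (PySem.List.enumerate matrix) then PySem.Set.add result p.1
      else result)
    PySem.Set.empty

-- ===== PORT B =====
-- "for k, x in enumerate(row): if x == 1: col[k] |= 1 << j"
def markRow (j : Nat) : Nat → List Int → List Nat → List Nat
  | _, [], col => col
  | k, x :: xs, col =>
      markRow j (k + 1) xs (if x = 1 then col.set k (col.getD k 0 ||| 1 <<< j) else col)

-- "for j, row in enumerate(matrix): …"  (building the per-column bitsets of rows)
def buildCols : Nat → List (List Int) → List Nat → List Nat
  | _, [], col => col
  | j, row :: rest, col => buildCols (j + 1) rest (markRow j 0 row col)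

-- "for k, x in enumerate(row): if x != 1: violators |= col[k]"
def violLoop (col : List Nat) : Nat → List Int → Nat → Nat
  | _, [], v => v
  | k, x :: xs, v => violLoop col (k + 1) xs (if x ≠ 1 then v ||| col.getD k 0 else v)

-- "for i, row in enumerate(matrix): …"  (collect i whose violator set is not all rows)
def outerLoopB (col : List Nat) (allrows : Nat) : Nat → List (List Int) → PySem.Set Int → PySem.Set Int
  | _, [], res => res
  | i, row :: rest, res =>
      outerLoopB col allrows (i + 1) rest
        (if violLoop col 0 row (1 <<< i) ≠ allrows then PySem.Set.add res (Int.ofNat i) else res)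

def rows_to_remove_alt (matrix : List (List Int)) : List Int :=
  let n := matrix.length
  -- max((len(row) for row in matrix), default=0): lengths are ≥ 0, so foldl max 0 is exact
  let width := (matrix.map List.length).foldl max 0
  let col := buildCols 0 matrix (List.replicate width 0)
  let allrows := (1 <<< n) - 1
  outerLoopB col allrows 0 matrix PySem.Set.empty

-- ===== PRECONDITION & SPEC =====
def Spec_rows_to_remove (matrix : List (List Int)) (out : List Int) : Prop := out = rows_to_remove_alt matrix
instance (matrix : List (List Int)) (out : List Int) : Decidable (Spec_rows_to_remove matrix out) := by unfold Spec_rows_to_remove; infer_instance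

-- ===== CLAIM (what is proved, stated in full; the proofs are below) =====
def Claim_equal_rows_to_remove : Prop := ∀ (matrix : List (List Int)), Dom_rows_to_remove matrix → Spec_rows_to_remove matrix (rows_to_remove matrix)

-- ===== LEMMAS AND PROOFS =====

-- getD after set, in one formula
theorem list_getD_set (l : List Nat) (i t a : Nat) :
    (l.set i a).getD t 0 = if i = t ∧ i < l.length then a else l.getD t 0 := by
  induction l generalizing i t with
  | nil => simp
  | cons x xs ih =>
      cases i with
      | zero => cases t <;> simp
      | succ i =>
          cases t with
          | zero => simp
          | succ t => simpa using ih i t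

theorem replicate_getD_zero (w t : Nat) : (List.replicate w (0 : Nat)).getD t 0 = 0 := by
  induction w generalizing t with
  | zero => simp
  | succ w ih =>
      cases t with
      | zero => simp
      | succ t => simp [List.replicate_succ]

theorem one_shiftLeft_testBit (j s : Nat) : ((1 <<< j).testBit s = true) ↔ j = s := by
  rw [Nat.one_shiftLeft, Nat.testBit_two_pow]
  simp

-- A's is_subset characterised pointwise
theorem is_subset_iff (o r : List Int) :
    is_subset o r = true ↔
      ∀ k, k < o.length → k < r.length → o.getD k 0 = 1 → r.getD k 0 = 1 := by
  unfold is_subset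
  induction o generalizing r with
  | nil => simp [isSubsetLoop]
  | cons a o ih =>
      cases r with
      | nil => simp [isSubsetLoop]
      | cons b r =>
          simp only [List.zip_cons_cons, isSubsetLoop]
          by_cases hab : a = 1 ∧ b ≠ 1
          · simp only [if_pos hab]
            constructor
            · intro h; exact absurd h (by simp)
            · intro h
              exact absurd (h 0 (by simp) (by simp) (by simpa using hab.1)) (by simpa using hab.2)
          · simp only [if_neg hab]
            rw [ih]
            constructor
            · intro h k hk1 hk2 h1
              cases k with
              | zero =>
                  simp only [List.getD_cons_zero] at h1 ⊢
                  by_cases hb : b = 1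
                  · exact hb
                  · exact absurd ⟨h1, hb⟩ hab
              | succ k =>
                  simp only [List.getD_cons_succ] at h1 ⊢
                  exact h k (by simpa using hk1) (by simpa using hk2) h1
            · intro h k hk1 hk2 h1
              exact h (k + 1) (by simpa using hk1) (by simpa using hk2) (by simpa using h1)

-- A's inner loop is an 'any' over the pair list
theorem innerLoop_eq_any (i : Int) (row : List Int) (l : List (Int × List Int)) :
    innerLoop i row l = l.any (fun p => !(p.1 == i) && is_subset p.2 row) := by
  induction l with
  | nil => rfl
  | cons p l ih =>
      obtain ⟨j, other⟩ := p
      simp only [innerLoop, List.any_cons]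
      by_cases hij : i = j
      · subst hij
        simp [ih]
      · rcases Bool.eq_false_or_eq_true (is_subset other row) with hs | hs <;>
          simp [hij, Ne.symm hij, hs, ih]

-- markRow preserves the length of col
theorem markRow_length (j : Nat) (xs : List Int) :
    ∀ (k : Nat) (col : List Nat), (markRow j k xs col).length = col.length := by
  induction xs with
  | nil => intro k col; rfl
  | cons x xs ih =>
      intro k col
      simp only [markRow, ih]
      split <;> simp

-- value of a markRow cell
theorem markRow_getD (j : Nat) (xs : List Int) :
    ∀ (k : Nat) (col : List Nat) (t : Nat),
      (markRow j k xs col).getD t 0 =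
        if k ≤ t ∧ t - k < xs.length ∧ xs.getD (t - k) 0 = 1 ∧ t < col.length then
          col.getD t 0 ||| 1 <<< j
        else col.getD t 0 := by
  induction xs with
  | nil =>
      intro k col t
      simp [markRow]
  | cons x xs ih =>
      intro k col t
      simp only [markRow]
      rw [ih]
      have hlen : (if x = 1 then col.set k (col.getD k 0 ||| 1 <<< j) else col).length = col.length := by
        split <;> simp
      rw [hlen]
      have hget : (if x = 1 then col.set k (col.getD k 0 ||| 1 <<< j) else col).getD t 0
          = if x = 1 ∧ t = k ∧ k < col.length then col.getD k 0 ||| 1 <<< j else col.getD t 0 := by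
        split_ifs with h1 h2 h2
        · rw [list_getD_set, if_pos ⟨h2.2.1.symm, h2.2.2⟩]
        · rw [list_getD_set, if_neg (fun h => h2 ⟨h1, h.1.symm, h.2⟩)]
        · exact absurd h2.1 h1
        · rfl
      by_cases htk : t = k
      · have hout : ¬ (k + 1 ≤ t ∧ t - (k + 1) < xs.length ∧ xs.getD (t - (k + 1)) 0 = 1 ∧
            t < col.length) := by
          rintro ⟨h, -⟩
          omega
        rw [if_neg hout, hget]
        subst htk
        have hcc : (x = 1 ∧ t = t ∧ t < col.length) ↔
            (t ≤ t ∧ t - t < (x :: xs).length ∧ (x :: xs).getD (t - t) 0 = 1 ∧ t < col.length) := by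
          constructor
          · rintro ⟨hx1, -, hk⟩
            exact ⟨le_refl _, by simp, by simpa [Nat.sub_self] using hx1, hk⟩
          · rintro ⟨-, -, h3, h4⟩
            exact ⟨by simpa [Nat.sub_self] using h3, rfl, h4⟩
        exact if_congr hcc rfl rfl
      · have hget2 : (if x = 1 then col.set k (col.getD k 0 ||| 1 <<< j) else col).getD t 0
            = col.getD t 0 := by
          rw [hget]
          exact if_neg (fun h => htk h.2.1)
        rw [hget2]
        have hiff : (k + 1 ≤ t ∧ t - (k + 1) < xs.length ∧ xs.getD (t - (k + 1)) 0 = 1 ∧ t < col.length)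
            ↔ (k ≤ t ∧ t - k < (x :: xs).length ∧ (x :: xs).getD (t - k) 0 = 1 ∧ t < col.length) := by
          constructor
          · rintro ⟨h1, h2, h3, h4⟩
            have hsub : t - k = (t - (k + 1)) + 1 := by omega
            refine ⟨by omega, by rw [List.length_cons]; omega, ?_, h4⟩
            rw [hsub, List.getD_cons_succ]
            exact h3
          · rintro ⟨h1, h2, h3, h4⟩
            have h1' : k + 1 ≤ t := by omega
            have hsub : t - k = (t - (k + 1)) + 1 := by omega
            rw [hsub, List.getD_cons_succ] at h3
            rw [List.length_cons] at h2
            exact ⟨h1', by omega, h3, h4⟩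
        exact if_congr hiff rfl rfl

-- a buildCols cell, bit by bit
theorem buildCols_testBit (rest : List (List Int)) :
    ∀ (j : Nat) (col : List Nat),
      (∀ row ∈ rest, row.length ≤ col.length) →
      ∀ (t s : Nat),
        ((buildCols j rest col).getD t 0).testBit s = true ↔
          ((col.getD t 0).testBit s = true ∨
            (j ≤ s ∧ s - j < rest.length ∧ t < (rest.getD (s - j) []).length ∧
             (rest.getD (s - j) []).getD t 0 = 1)) := by
  induction rest with
  | nil =>
      intro j col _ t s
      simp [buildCols]
  | cons row rest ih =>
      intro j col hlen t s
      simp only [buildCols]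
      rw [ih (j + 1) _ (by
        intro r hr
        rw [markRow_length]
        exact hlen r (List.mem_cons_of_mem _ hr)) t s]
      rw [markRow_getD]
      split_ifs with hcond
      · -- this cell was updated with bit j
        rw [Nat.testBit_or]
        simp only [Bool.or_eq_true]
        constructor
        · rintro ((hb | hb) | ⟨h1, h2, h3, h4⟩)
          · exact Or.inl hb
          · have hji : j = s := (one_shiftLeft_testBit j s).mp hb
            right
            refine ⟨by omega, by rw [List.length_cons]; omega, ?_, ?_⟩ <;>
              rw [show s - j = 0 from by omega, List.getD_cons_zero]
            · have := hcond.2.1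
              simpa using this
            · have := hcond.2.2.1
              simpa using this
          · have hsub : s - j = (s - (j + 1)) + 1 := by omega
            right
            refine ⟨by omega, by rw [List.length_cons]; omega, ?_, ?_⟩ <;>
              rw [hsub, List.getD_cons_succ]
            · exact h3
            · exact h4
        · rintro (hb | ⟨h1, h2, h3, h4⟩)
          · exact Or.inl (Or.inl hb)
          · by_cases hsj : s = j
            · exact Or.inl (Or.inr ((one_shiftLeft_testBit j s).mpr hsj.symm))
            · right
              have hsub : s - j = (s - (j + 1)) + 1 := by omega
              rw [hsub, List.getD_cons_succ] at h3 h4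
              rw [List.length_cons] at h2
              exact ⟨by omega, by omega, h3, h4⟩
      · -- this cell untouched by row
        constructor
        · rintro (hb | ⟨h1, h2, h3, h4⟩)
          · exact Or.inl hb
          · have hsub : s - j = (s - (j + 1)) + 1 := by omega
            right
            refine ⟨by omega, by rw [List.length_cons]; omega, ?_, ?_⟩ <;>
              rw [hsub, List.getD_cons_succ]
            · exact h3
            · exact h4
        · rintro (hb | ⟨h1, h2, h3, h4⟩)
          · exact Or.inl hb
          · by_cases hsj : s = j
            · exfalso
              apply hcond
              rw [hsj, Nat.sub_self, List.getD_cons_zero] at h3 h4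
              exact ⟨Nat.zero_le t, by simpa using h3, by simpa using h4,
                lt_of_lt_of_le h3 (hlen row (by simp))⟩
            · right
              have hsub : s - j = (s - (j + 1)) + 1 := by omega
              rw [hsub, List.getD_cons_succ] at h3 h4
              rw [List.length_cons] at h2
              exact ⟨by omega, by omega, h3, h4⟩

-- a violLoop bit, as an existential
theorem violLoop_testBit (col : List Nat) (xs : List Int) :
    ∀ (k v s : Nat),
      (violLoop col k xs v).testBit s = true ↔
        v.testBit s = true ∨
          ∃ idx, idx < xs.length ∧ xs.getD idx 0 ≠ 1 ∧ (col.getD (k + idx) 0).testBit s = true := by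
  induction xs with
  | nil =>
      intro k v s
      simp [violLoop]
  | cons x xs ih =>
      intro k v s
      simp only [violLoop]
      rw [ih]
      by_cases hx : x = 1
      · rw [if_neg (by simp [hx])]
        constructor
        · rintro (hb | ⟨idx, h1, h2, h3⟩)
          · exact Or.inl hb
          · refine Or.inr ⟨idx + 1, by simpa using h1, by simpa using h2, ?_⟩
            rw [show k + (idx + 1) = k + 1 + idx from by omega]
            exact h3
        · rintro (hb | ⟨idx, h1, h2, h3⟩)
          · exact Or.inl hb
          · cases idx with
            | zero => rw [List.getD_cons_zero] at h2; exact absurd hx h2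
            | succ idx =>
                rw [List.getD_cons_succ] at h2
                refine Or.inr ⟨idx, by simpa using h1, h2, ?_⟩
                rw [show k + 1 + idx = k + (idx + 1) from by omega]
                exact h3
      · rw [if_pos hx]
        simp only [Nat.testBit_or, Bool.or_eq_true]
        constructor
        · rintro ((hb | hb) | ⟨idx, h1, h2, h3⟩)
          · exact Or.inl hb
          · exact Or.inr ⟨0, by simp, by simpa using hx, by simpa using hb⟩
          · refine Or.inr ⟨idx + 1, by simpa using h1, by simpa using h2, ?_⟩
            rw [show k + (idx + 1) = k + 1 + idx from by omega]
            exact h3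
        · rintro (hb | ⟨idx, h1, h2, h3⟩)
          · exact Or.inl (Or.inl hb)
          · cases idx with
            | zero => exact Or.inl (Or.inr (by simpa using h3))
            | succ idx =>
                refine Or.inr ⟨idx, by simpa using h1, by simpa using h2, ?_⟩
                rw [show k + 1 + idx = k + (idx + 1) from by omega]
                exact h3

-- the condition A tests for row i equals the condition B tests, for any i < n
theorem cond_eq (matrix : List (List Int)) (col : List Nat)
    (hcol : ∀ t s : Nat, ((col.getD t 0).testBit s = true ↔
        (s < matrix.length ∧ t < (matrix.getD s []).length ∧ (matrix.getD s []).getD t 0 = 1)))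
    (i : Nat) (hi : i < matrix.length) (row : List Int) :
    (innerLoop (i : Int) row (PySem.List.enumerate matrix) = true ↔
      violLoop col 0 row (1 <<< i) ≠ (1 <<< matrix.length) - 1) := by
  have hV : ∀ s : Nat, ((violLoop col 0 row (1 <<< i)).testBit s = true ↔
      (s = i ∨ ∃ k, k < row.length ∧ row.getD k 0 ≠ 1 ∧ s < matrix.length ∧
        k < (matrix.getD s []).length ∧ (matrix.getD s []).getD k 0 = 1)) := by
    intro s
    rw [violLoop_testBit]
    constructor
    · rintro (hb | ⟨idx, h1, h2, h3⟩)
      · exact Or.inl ((one_shiftLeft_testBit i s).mp hb).symm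
      · rw [Nat.zero_add, hcol] at h3
        exact Or.inr ⟨idx, h1, h2, h3.1, h3.2.1, h3.2.2⟩
    · rintro (rfl | ⟨k, h1, h2, h3, h4, h5⟩)
      · exact Or.inl ((one_shiftLeft_testBit s s).mpr rfl)
      · refine Or.inr ⟨k, h1, h2, ?_⟩
        rw [Nat.zero_add, hcol]
        exact ⟨h3, h4, h5⟩
  have hbound : ∀ s, (violLoop col 0 row (1 <<< i)).testBit s = true → s < matrix.length := by
    intro s hs
    rcases (hV s).mp hs with rfl | ⟨k, _, _, h3, _, _⟩
    · exact hi
    · exact h3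
  have hne : violLoop col 0 row (1 <<< i) ≠ (1 <<< matrix.length) - 1 ↔
      ∃ s, s < matrix.length ∧ (violLoop col 0 row (1 <<< i)).testBit s = false := by
    rw [show (1 : Nat) <<< matrix.length - 1 = 2 ^ matrix.length - 1 from by
      rw [Nat.one_shiftLeft]]
    constructor
    · intro h
      by_contra hno
      push Not at hno
      apply h
      apply Nat.eq_of_testBit_eq
      intro s
      rw [Nat.testBit_two_pow_sub_one]
      cases hbit : (violLoop col 0 row (1 <<< i)).testBit s with
      | false =>
          by_cases hs : s < matrix.length
          · exact absurd hbit (hno s hs)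
          · simp [hs]
      | true => simp [hbound s hbit]
    · rintro ⟨s, hs, hbit⟩ heq
      rw [heq, Nat.testBit_two_pow_sub_one] at hbit
      simp [hs] at hbit
  rw [innerLoop_eq_any, PySem.List.enumerate_eq_map_pyRange matrix ([] : List Int),
    List.any_map, List.any_eq_true, hne]
  constructor
  · rintro ⟨j, hj, hpred⟩
    rw [PySem.List.mem_pyRange_one] at hj
    obtain ⟨hj0, hjn⟩ := hj
    lift j to ℕ using hj0 with s
    simp only [Function.comp_apply, Bool.and_eq_true] at hpred
    obtain ⟨hp1, hp2⟩ := hpred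
    have hsn : s < matrix.length := by exact_mod_cast (by simpa using hjn : (s : Int) < (matrix.length : Int))
    have hsi : s ≠ i := by rintro rfl; simp at hp1
    rw [PySem.List.pyGetD_natCast matrix s []] at hp2
    refine ⟨s, hsn, ?_⟩
    cases hbit : (violLoop col 0 row (1 <<< i)).testBit s with
    | false => rfl
    | true =>
        exfalso
        rcases (hV s).mp hbit with h | ⟨k, hk1, hk2, _, hk4, hk5⟩
        · exact hsi h
        · exact hk2 ((is_subset_iff _ _).mp hp2 k hk4 hk1 hk5)
  · rintro ⟨s, hsn, hbit⟩
    refine ⟨(s : Int), ?_, ?_⟩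
    · rw [PySem.List.mem_pyRange_one]
      constructor
      · exact_mod_cast Nat.zero_le s
      · simpa using (by exact_mod_cast hsn : (s : Int) < (matrix.length : Int))
    · simp only [Function.comp_apply]
      have hsi : s ≠ i := by
        rintro rfl
        rw [(hV s).mpr (Or.inl rfl)] at hbit
        cases hbit
      have hsub : is_subset (matrix.getD s []) row = true := by
        rw [is_subset_iff]
        intro k hk1 hk2 hk3
        by_contra hk4
        rw [(hV s).mpr (Or.inr ⟨k, hk2, hk4, hsn, hk1, hk3⟩)] at hbit
        cases hbit
      have hbeq : ((s : Int) == (i : Int)) = false := by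
        simp [hsi]
      rw [PySem.List.pyGetD_natCast matrix s []]
      simp only [hbeq, Bool.not_false, Bool.true_and]
      exact hsub

-- the two outer loops agree once the per-row conditions agree
theorem outer_eq (matrix : List (List Int)) (col : List Nat) (allrows : Nat)
    (h : ∀ (i : Nat) (row : List Int), i < matrix.length →
        (innerLoop (i : Int) row (PySem.List.enumerate matrix) = true ↔
          violLoop col 0 row (1 <<< i) ≠ allrows)) :
    ∀ (rows : List (List Int)) (i : Nat) (res : PySem.Set Int),
      i + rows.length ≤ matrix.length →
      (PySem.List.enumerate rows (i : Int)).foldl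
        (fun result p =>
          if innerLoop p.1 p.2 (PySem.List.enumerate matrix) then PySem.Set.add result p.1
          else result) res
      = outerLoopB col allrows i rows res := by
  intro rows
  induction rows with
  | nil => intro i res _; rfl
  | cons row rest ih =>
      intro i res hlen
      rw [PySem.List.enumerate_cons, List.foldl_cons]
      simp only [outerLoopB]
      have hi : i < matrix.length := by simp at hlen; omega
      have hcond := h i row hi
      have hcast : ((i : Int) + 1) = ((i + 1 : Nat) : Int) := by push_cast; ring
      rw [hcast, ih (i + 1) _ (by simp at hlen ⊢; omega)]
      congr 1
      by_cases hA : innerLoop (i : Int) row (PySem.List.enumerate matrix) = true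
      · rw [if_pos hA, if_pos (hcond.mp hA)]
        rfl
      · rw [if_neg hA, if_neg (fun hB => hA (hcond.mpr hB))]

theorem rows_to_remove_spec_aux (matrix : List (List Int)) :
    rows_to_remove matrix = rows_to_remove_alt matrix := by
  have halt : rows_to_remove_alt matrix =
      outerLoopB (buildCols 0 matrix (List.replicate ((matrix.map List.length).foldl max 0) 0))
        ((1 <<< matrix.length) - 1) 0 matrix PySem.Set.empty := rfl
  rw [halt]
  have hw : ∀ row ∈ matrix, row.length ≤ (matrix.map List.length).foldl max 0 := by
    intro row hr
    exact (PySem.List.le_foldl_max (matrix.map List.length) 0).2 _ (List.mem_map_of_mem hr)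
  have hcol : ∀ t s : Nat,
      (((buildCols 0 matrix (List.replicate ((matrix.map List.length).foldl max 0) 0)).getD t 0).testBit s = true ↔
        (s < matrix.length ∧ t < (matrix.getD s []).length ∧ (matrix.getD s []).getD t 0 = 1)) := by
    intro t s
    rw [buildCols_testBit matrix 0 _ (by
      intro r hr
      rw [List.length_replicate]
      exact hw r hr) t s]
    rw [replicate_getD_zero]
    simp [Nat.zero_testBit]
  have hc : ∀ (i : Nat) (row : List Int), i < matrix.length →
      (innerLoop (i : Int) row (PySem.List.enumerate matrix) = true ↔
        violLoop (buildCols 0 matrix (List.replicate ((matrix.map List.length).foldl max 0) 0))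
          0 row (1 <<< i) ≠ (1 <<< matrix.length) - 1) :=
    fun i row hi => cond_eq matrix _ hcol i hi row
  have h := outer_eq matrix _ ((1 <<< matrix.length) - 1) hc matrix 0 PySem.Set.empty (by omega)
  unfold rows_to_remove
  simpa using h

-- ===== VERDICT (by name: the statement is the Claim_ definition above) =====
theorem rows_to_remove_spec : Claim_equal_rows_to_remove := by
  intro matrix _
  unfold Spec_rows_to_remove
  exact rows_to_remove_spec_aux matrix
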